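-- pv_equiv track=rewrite | github.com/Transformer-Health-Monitoring/Transformer-Health-Monitoring---Fault-Prediction | MajorProject.py | classify_fault
-- ===== SOURCE A (Python) =====
-- def classify_fault(row):
--
--     conditions = [
--         {
--             "fault_type": "Overheating and Overvoltage",
--             "cause": "High voltage causing excessive heat or cooling system failure",
--             "condition": row["voltage"] > 240 and row["temp"] > 90
--         },
--         {
--             "fault_type": "Overvoltage",
--             "cause": "Grid surge or faulty voltage regulator",
--             "condition": row["voltage"] > 240
--         },
--         {
--             "fault_type": "Undervoltage",
--             "cause": "Grid instability or transformer overload",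
--             "condition": row["voltage"] < 180
--         },
--         {
--             "fault_type": "Normal Condition",
--             "cause": "All parameters within normal operating range",
--             "condition": True  # Default case
--         }
--     ]
--
--
--     for condition in conditions:
--         if condition["condition"]:
--             return condition["fault_type"],condition["cause"]#,condition["cause"]
-- ===== SOURCE B (Python) =====
-- # Arithmetic band classification: count exceeded voltage thresholds to index a
-- # band table; only the top band consults the temperature.
-- _VOLT_THRESHOLDS = (179, 240)  # band 0: v <= 179 (under), 1: 180..240 (normal), 2: v > 240 (over)
--
-- _LOW_BANDS = [
--     ("Undervoltage", "Grid instability or transformer overload"),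
--     ("Normal Condition", "All parameters within normal operating range"),
-- ]
--
-- def classify_fault(row):
--     v = row["voltage"]
--     band = sum(v > t for t in _VOLT_THRESHOLDS)
--     if band < 2:
--         return _LOW_BANDS[band]
--     if row["temp"] > 90:
--         return ("Overheating and Overvoltage",
--                 "High voltage causing excessive heat or cooling system failure")
--     return ("Overvoltage", "Grid surge or faulty voltage regulator")
-- ===== Notes on version B (the rewrite author's own statement) =====
-- stated objective: alternative
-- what changed: Replaces the list-of-dicts rule table and first-true scanning loop by counting how many voltage thresholds are exceeded to get an arithmetic band index used to index a two-entry band table, consulting the temperature only in the top band.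
import Mathlib
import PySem

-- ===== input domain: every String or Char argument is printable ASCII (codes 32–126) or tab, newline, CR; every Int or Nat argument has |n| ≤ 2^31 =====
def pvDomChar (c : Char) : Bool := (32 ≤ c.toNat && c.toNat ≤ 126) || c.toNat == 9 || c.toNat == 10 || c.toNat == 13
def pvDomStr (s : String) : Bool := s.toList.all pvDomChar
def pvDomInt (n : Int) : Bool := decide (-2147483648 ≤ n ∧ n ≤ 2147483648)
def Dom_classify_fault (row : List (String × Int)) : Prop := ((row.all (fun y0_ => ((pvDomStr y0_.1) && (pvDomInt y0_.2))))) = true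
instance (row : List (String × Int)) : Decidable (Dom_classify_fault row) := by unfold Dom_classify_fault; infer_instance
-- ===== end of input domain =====

-- B replaces A's list-of-dicts rule table + first-true scan with threshold-counting band arithmetic
-- indexing a band table, consulting temperature only in the top band (alternative; same cost).


-- ===== PORT A =====
-- scan A's conditions table for the first entry whose condition is true (A's for-loop);
-- Python would fall off the loop only if no condition held — unreachable since the last is True,
-- so the [] case's value is never produced.
def pvScanConds (conds : List ((String × String) × Bool)) : String × String :=
  match conds with
  | [] => ("", "")
  | (pair, c) :: rest => if c then pair else pvScanConds rest

-- A: build the table eagerly (row["voltage"] always looked up; row["temp"] only matters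
-- when voltage > 240 — Pre_ excludes the KeyError cases, so getD _ _ 0 is exact there), then scan.
def classify_fault (row : List (String × Int)) : String × String :=
  let d := PySem.Dict.mk row
  let conditions : List ((String × String) × Bool) :=
    [ (("Overheating and Overvoltage",
        "High voltage causing excessive heat or cooling system failure"),
       decide (PySem.Dict.getD d "voltage" 0 > 240) && decide (PySem.Dict.getD d "temp" 0 > 90)),
      (("Overvoltage", "Grid surge or faulty voltage regulator"),
       decide (PySem.Dict.getD d "voltage" 0 > 240)),
      (("Undervoltage", "Grid instability or transformer overload"),
       decide (PySem.Dict.getD d "voltage" 0 < 180)),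
      (("Normal Condition", "All parameters within normal operating range"), true) ]
  pvScanConds conditions

-- ===== PORT B =====
-- B's module-level band table (_LOW_BANDS in Source B)
def pvLowBands : List (String × String) :=
  [ ("Undervoltage", "Grid instability or transformer overload"),
    ("Normal Condition", "All parameters within normal operating range") ]

-- B: band = number of exceeded thresholds (sum over _VOLT_THRESHOLDS); bands 0/1 index the
-- table (band ∈ {0,1} there, so the pyGet? default is never produced); band 2 consults temp.
def classify_fault_alt (row : List (String × Int)) : String × String :=
  let d := PySem.Dict.mk row
  let v := PySem.Dict.getD d "voltage" 0
  let band : Int := [(179 : Int), 240].foldl (fun acc t => acc + (if v > t then 1 else 0)) 0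
  if band < 2 then
    (PySem.List.pyGet? pvLowBands band).getD ("", "")
  else if PySem.Dict.getD d "temp" 0 > 90 then
    ("Overheating and Overvoltage",
     "High voltage causing excessive heat or cooling system failure")
  else
    ("Overvoltage", "Grid surge or faulty voltage regulator")

-- ===== PRECONDITION & SPEC =====
-- Pre_ excludes exactly the KeyError inputs: rows missing "voltage", and rows whose
-- voltage exceeds 240 but which lack "temp" (both A and B raise KeyError there).
def Pre_classify_fault (row : List (String × Int)) : Prop :=
  ((PySem.Dict.mk row).get? "voltage").isSome = true ∧
  (PySem.Dict.getD (PySem.Dict.mk row) "voltage" 0 > 240 →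
    ((PySem.Dict.mk row).get? "temp").isSome = true)
instance (row : List (String × Int)) : Decidable (Pre_classify_fault row) := by
  unfold Pre_classify_fault; infer_instance

def pvWitness_classify_fault : (List (String × Int)) := [("voltage", 250), ("temp", 95)]

def Spec_classify_fault (row : List (String × Int)) (out : String × String) : Prop := out = classify_fault_alt row
instance (row : List (String × Int)) (out : String × String) : Decidable (Spec_classify_fault row out) := by unfold Spec_classify_fault; infer_instance

-- ===== CLAIM (what is proved, stated in full; the proofs are below) =====
def Claim_equal_classify_fault : Prop := ∀ (row : List (String × Int)), Dom_classify_fault row → Pre_classify_fault row → Spec_classify_fault row (classify_fault row)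

-- ===== LEMMAS AND PROOFS =====

-- ===== VERDICT (by name: the statement is the Claim_ definition above) =====
theorem classify_fault_spec : Claim_equal_classify_fault := by
  intro row _ _
  simp only [Spec_classify_fault, classify_fault, classify_fault_alt, pvScanConds,
    List.foldl, pvLowBands]
  by_cases h1 : PySem.Dict.getD (PySem.Dict.mk row) "voltage" 0 > 240 <;>
  by_cases h2 : PySem.Dict.getD (PySem.Dict.mk row) "voltage" 0 > 179 <;>
  by_cases h3 : PySem.Dict.getD (PySem.Dict.mk row) "temp" 0 > 90 <;>
    simp [h1, h2, h3, PySem.List.pyGet?, PySem.List.pyIdx?] <;> omega
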